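-- pv_equiv track=rewrite | github.com/ierofeev-qa/otus_python_qa_homework | data_task/books_for_users.py | distribute_books_to_users
-- ===== SOURCE A (Python) =====
-- def distribute_books_to_users(books_list, users_list):
--     minimum_chunk_length = len(books_list) // len(users_list)
--     remain_books_count = len(books_list) % len(users_list)
--     result = []
--     iterator = iter(books_list)
--     for i in range(len(users_list)):
--         result.append([])
--         for j in range(minimum_chunk_length):
--             result[i].append(iterator.__next__())
--         if remain_books_count:
--             result[i].append(iterator.__next__())
--             remain_books_count -= 1
--     return result
-- ===== SOURCE B (Python) =====
-- def distribute_books_to_users(books_list, users_list):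
--     base, rem = divmod(len(books_list), len(users_list))
--     result = []
--     start = 0
--     for i in range(len(users_list)):
--         size = base + (1 if i < rem else 0)
--         result.append(list(books_list[start:start + size]))
--         start += size
--     return result
-- ===== Notes on version B (the rewrite author's own statement) =====
-- stated objective: simpler
-- what changed: Replaces the iterator-consuming nested append loop (one __next__ per book, with a mutable remainder counter) by boundary arithmetic: each user's chunk is a single slice of size base + (1 if i < remainder), with a running start index.
import Mathlib
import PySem

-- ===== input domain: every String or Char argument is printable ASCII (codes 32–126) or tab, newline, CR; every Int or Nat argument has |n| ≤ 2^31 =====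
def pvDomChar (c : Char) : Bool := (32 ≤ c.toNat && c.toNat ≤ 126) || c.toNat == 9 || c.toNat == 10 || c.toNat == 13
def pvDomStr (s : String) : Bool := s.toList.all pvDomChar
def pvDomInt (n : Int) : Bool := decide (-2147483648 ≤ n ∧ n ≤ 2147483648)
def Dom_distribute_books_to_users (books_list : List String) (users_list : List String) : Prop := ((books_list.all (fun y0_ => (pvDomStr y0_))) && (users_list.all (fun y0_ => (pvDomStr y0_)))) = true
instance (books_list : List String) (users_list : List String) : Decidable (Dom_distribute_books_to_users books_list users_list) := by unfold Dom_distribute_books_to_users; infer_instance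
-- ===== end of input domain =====

-- B replaces A's iterator-consuming nested append loop by a running start index and
-- one slice per user (simpler decomposition, same cost).  Pre_ excludes empty
-- users_list, on which A raises ZeroDivisionError (and B raises too).

-- ===== PORT A =====
-- inner loop 'for j in range(m): chunk.append(iterator.__next__())', step for step;
-- state = (chunk built so far, remaining iterator).  Under Pre_ the iterator never
-- exhausts, so the StopIteration branch is unreachable; for totality an exhausted
-- iterator yields "" (never hit on admitted inputs).
def pvA_fill : Nat → List String → List String → List String × List String
  | 0, chunk, it => (chunk, it)
  | j + 1, chunk, it => pvA_fill j (chunk ++ [it.headD ""]) it.tail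

-- outer loop 'for i in range(len(users_list))': state = (result, iterator, remain_books_count)
def pvA_loop : Nat → List (List String) → List String → Nat → Nat → List (List String)
  | 0, result, _, _, _ => result
  | i + 1, result, it, m, rem =>
    let (chunk, it') := pvA_fill m [] it
    if rem ≠ 0 then
      pvA_loop i (result ++ [chunk ++ [it'.headD ""]]) it'.tail m (rem - 1)
    else
      pvA_loop i (result ++ [chunk]) it' m rem

-- both lengths are nonnegative, so Python's // and % are Nat division/modulo here
def distribute_books_to_users (books_list : List String) (users_list : List String) : List (List String) :=
  let minimum_chunk_length := books_list.length / users_list.length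
  let remain_books_count := books_list.length % users_list.length
  pvA_loop users_list.length [] books_list minimum_chunk_length remain_books_count

-- ===== PORT B =====
-- 'for i in range(len(users_list))' with running start; books_list[start:start+size]
def pvB_go (books : List String) (base rem : Nat) : Nat → Nat → Nat → List (List String)
  | 0, _, _ => []
  | cnt + 1, i, start =>
    let size := base + (if i < rem then 1 else 0)
    PySem.List.slice books (some (start : Int)) (some ((start : Int) + (size : Int)))
      :: pvB_go books base rem cnt (i + 1) (start + size)

def distribute_books_to_users_alt (books_list : List String) (users_list : List String) : List (List String) :=
  let base := books_list.length / users_list.length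
  let rem := books_list.length % users_list.length
  pvB_go books_list base rem users_list.length 0 0

-- ===== PRECONDITION & SPEC =====
-- Pre_ excludes only empty users_list, on which A raises ZeroDivisionError
def Pre_distribute_books_to_users (books_list : List String) (users_list : List String) : Prop :=
  users_list ≠ []
instance (books_list : List String) (users_list : List String) : Decidable (Pre_distribute_books_to_users books_list users_list) := by unfold Pre_distribute_books_to_users; infer_instance
def pvWitness_distribute_books_to_users : List String × List String := (["a", "b", "c"], ["u", "v"])

def Spec_distribute_books_to_users (books_list : List String) (users_list : List String) (out : List (List String)) : Prop := out = distribute_books_to_users_alt books_list users_list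
instance (books_list : List String) (users_list : List String) (out : List (List String)) : Decidable (Spec_distribute_books_to_users books_list users_list out) := by unfold Spec_distribute_books_to_users; infer_instance

-- ===== CLAIM (what is proved, stated in full; the proofs are below) =====
def Claim_equal_distribute_books_to_users : Prop := ∀ (books_list : List String) (users_list : List String), Dom_distribute_books_to_users books_list users_list → Pre_distribute_books_to_users books_list users_list → Spec_distribute_books_to_users books_list users_list (distribute_books_to_users books_list users_list)

-- ===== LEMMAS AND PROOFS =====

-- reference chunking both loops are shown equal to
def pvChunks : Nat → List String → Nat → Nat → List (List String)
  | 0, _, _, _ => []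
  | cnt + 1, it, base, rem =>
    let size := base + (if 0 < rem then 1 else 0)
    it.take size :: pvChunks cnt (it.drop size) base (rem - 1)

theorem pvA_fill_eq (m : Nat) : ∀ (chunk it : List String), m ≤ it.length →
    pvA_fill m chunk it = (chunk ++ it.take m, it.drop m) := by
  induction m with
  | zero => intro chunk it _; simp [pvA_fill]
  | succ j ih =>
    intro chunk it h
    match it with
    | [] => simp at h
    | x :: xs =>
      simp only [pvA_fill, List.headD, List.tail]
      rw [ih (chunk ++ [x]) xs (by simpa using h)]
      simp

theorem pvA_loop_chunks : ∀ (cnt : Nat) (acc : List (List String)) (it : List String) (base rem : Nat),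
    rem ≤ cnt → cnt * base + rem ≤ it.length →
    pvA_loop cnt acc it base rem = acc ++ pvChunks cnt it base rem := by
  intro cnt
  induction cnt with
  | zero => intro acc it base rem _ _; simp [pvA_loop, pvChunks]
  | succ n ih =>
    intro acc it base rem hrem hlen
    have hs : (n + 1) * base = n * base + base := by ring
    have hbase : base ≤ it.length := by omega
    have hfill := pvA_fill_eq base [] it hbase
    simp only [pvA_loop, hfill]
    by_cases h0 : rem = 0
    · subst h0
      rw [if_neg (by simp)]
      rw [ih (acc ++ [[] ++ it.take base]) (it.drop base) base 0 (Nat.zero_le _)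
        (by simp; omega)]
      simp [pvChunks]
    · have hpos : 0 < rem := Nat.pos_of_ne_zero h0
      have hlt : base < it.length := by omega
      rw [if_pos h0]
      simp only [pvChunks, if_pos hpos]
      have hne : it.drop base ≠ [] := by
        intro hnil
        have : (it.drop base).length = 0 := by simp [hnil]
        simp at this; omega
      have hhead : (it.drop base).headD "" = it[base] := by
        rw [List.headD_eq_head? , List.head?_eq_some_head hne, List.head_drop]; rfl
      have htake : [] ++ it.take base ++ [(it.drop base).headD ""] = it.take (base + 1) := by
        rw [hhead, List.nil_append]
        exact (List.take_concat_get' it base hlt)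
      have hdrop : (it.drop base).tail = it.drop (base + 1) := by
        rw [← List.drop_drop]; simp
      rw [htake, hdrop]
      rw [ih (acc ++ [it.take (base + 1)]) (it.drop (base + 1)) base (rem - 1)
        (by omega) (by simp; omega)]
      simp

theorem pvB_go_chunks (books : List String) (base rem0 : Nat) :
    ∀ (cnt i : Nat), pvB_go books base rem0 cnt i ((i * base) + min i rem0)
      = pvChunks cnt (books.drop (i * base + min i rem0)) base (rem0 - i) := by
  intro cnt
  induction cnt with
  | zero => intro i; simp [pvB_go, pvChunks]
  | succ n ih =>
    intro i
    have hsm : (i + 1) * base = i * base + base := Nat.succ_mul i base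
    by_cases h : i < rem0
    · have h2 : 0 < rem0 - i := by omega
      simp only [pvB_go, pvChunks, if_pos h, if_pos h2]
      congr 1
      · rw [PySem.List.slice_natCast_add]
      · rw [show i * base + min i rem0 + (base + 1) = (i + 1) * base + min (i + 1) rem0 by rw [Nat.succ_mul]; omega,
          ih (i + 1), List.drop_drop,
          show rem0 - (i + 1) = rem0 - i - 1 by omega]
        congr 2
        rw [Nat.succ_mul]; omega
    · have h2 : ¬ 0 < rem0 - i := by omega
      simp only [pvB_go, pvChunks, if_neg h, if_neg h2]
      congr 1
      · rw [PySem.List.slice_natCast_add]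
      · rw [show i * base + min i rem0 + (base + 0) = (i + 1) * base + min (i + 1) rem0 by rw [Nat.succ_mul]; omega,
          ih (i + 1), List.drop_drop,
          show rem0 - (i + 1) = rem0 - i - 1 by omega]
        congr 2
        rw [Nat.succ_mul]; omega

-- ===== VERDICT (by name: the statement is the Claim_ definition above) =====
theorem distribute_books_to_users_spec : Claim_equal_distribute_books_to_users := by
  intro books users _ hpre
  unfold Spec_distribute_books_to_users distribute_books_to_users distribute_books_to_users_alt
  have hu : 0 < users.length := List.length_pos_iff.mpr hpre
  have hrem : books.length % users.length < users.length := Nat.mod_lt _ hu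
  have hdm : users.length * (books.length / users.length) + books.length % users.length
      = books.length := Nat.div_add_mod _ _
  rw [pvA_loop_chunks users.length [] books (books.length / users.length)
    (books.length % users.length) (by omega) (by omega)]
  have hB := pvB_go_chunks books (books.length / users.length)
    (books.length % users.length) users.length 0
  simp at hB ⊢
  rw [hB]
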